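-- pv_equiv track=rewrite | github.com/gpurci/SharedDeepNeuralNet | tensorflow/layers/permute/code/permute_match.py | _complete_position
-- ===== SOURCE A (Python) =====
-- def _complete_position(size_shape, keys, size_before, size_after):
--    # init positions
--    in_dict    = {}
--    in_list    = []
--    #
--    sec_idx = 0
--    for idx in range(0, size_shape, 1):
--       if (idx < size_before):
--          key = keys[idx]
--          in_dict[key] = idx
--          in_list.append(key)
--       elif (idx >= size_after):
--          key = keys[idx+1-sec_idx]
--          in_dict[key] = idx
--          in_list.append(key)
--       else:
--          key = "##{}".format(sec_idx)
--          in_dict[key] = idx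
--          in_list.append(key)
--          sec_idx += 1
--    #
--    return in_dict, in_list
-- ===== SOURCE B (Python) =====
-- def _complete_position(size_shape, keys, size_before, size_after):
--     # before segment: the first min(size_before, size_shape) keys, taken by slicing
--     before = keys[0:max(0, min(size_before, size_shape))]
--     # middle segment: m placeholder names '##0'..'##(m-1)'
--     m = max(0, min(size_after, size_shape) - max(size_before, 0))
--     middle = ["##{}".format(i) for i in range(m)]
--     # after segment: keys shifted by the +1 offset minus the placeholder count
--     start = max(size_before, size_after, 0)
--     after = [keys[idx + 1 - m] for idx in range(start, size_shape)]
--     in_list = before + middle + after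
--     in_dict = {key: pos for pos, key in enumerate(in_list)}
--     return in_dict, in_list
-- ===== Notes on version B (the rewrite author's own statement) =====
-- stated objective: alternative
-- what changed: Replaced the single interleaved loop with per-index branching and a running placeholder counter by region decomposition: slice the before segment, compute the placeholder count m in closed form and generate the middle placeholder names directly, build the after segment from the shifted indices, concatenate the three segments, and derive the index dict in one enumerate pass over the finished list.
import Mathlib
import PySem

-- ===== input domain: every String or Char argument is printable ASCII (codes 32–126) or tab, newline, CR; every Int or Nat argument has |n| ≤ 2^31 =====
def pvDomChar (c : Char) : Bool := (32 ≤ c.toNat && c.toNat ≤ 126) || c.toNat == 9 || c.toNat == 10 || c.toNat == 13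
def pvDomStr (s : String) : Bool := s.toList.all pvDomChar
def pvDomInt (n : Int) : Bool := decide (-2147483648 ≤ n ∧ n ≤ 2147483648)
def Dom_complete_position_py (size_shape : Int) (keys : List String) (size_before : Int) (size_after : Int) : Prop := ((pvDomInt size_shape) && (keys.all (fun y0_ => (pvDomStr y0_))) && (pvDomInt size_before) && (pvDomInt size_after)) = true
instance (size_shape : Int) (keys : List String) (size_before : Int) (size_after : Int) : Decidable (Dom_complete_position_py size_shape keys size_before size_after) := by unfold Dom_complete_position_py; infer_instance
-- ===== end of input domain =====

-- B replaces A's interleaved per-index loop by slicing/generating the three segments and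
-- building the index dict in one enumerate pass (alternative decomposition, same cost).

-- ===== PORT A =====
def complete_position_py (size_shape : Int) (keys : List String) (size_before : Int) (size_after : Int) : (List (String × Int)) × List String :=
  let fin := (PySem.List.pyRange 0 size_shape 1).foldl
    (fun (st : PySem.Dict String Int × List String × Int) idx =>
      if idx < size_before then
        let key := PySem.List.pyGetD keys idx ""
        (st.1.insert key idx, st.2.1 ++ [key], st.2.2)
      else if size_after ≤ idx then
        let key := PySem.List.pyGetD keys (idx + 1 - st.2.2) ""
        (st.1.insert key idx, st.2.1 ++ [key], st.2.2)
      else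
        let key := "##" ++ PySem.Int.toStr st.2.2
        (st.1.insert key idx, st.2.1 ++ [key], st.2.2 + 1))
    (PySem.Dict.empty, [], 0)
  (fin.1.items, fin.2.1)

-- ===== PORT B =====
def complete_position_py_alt (size_shape : Int) (keys : List String) (size_before : Int) (size_after : Int) : (List (String × Int)) × List String :=
  let before := PySem.List.slice keys (some 0) (some (max 0 (min size_before size_shape)))
  let m := max 0 (min size_after size_shape - max size_before 0)
  let middle := (PySem.List.pyRange 0 m 1).map (fun i => "##" ++ PySem.Int.toStr i)
  let start := max (max size_before size_after) 0
  let after := (PySem.List.pyRange start size_shape 1).map (fun idx => PySem.List.pyGetD keys (idx + 1 - m) "")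
  let in_list := before ++ middle ++ after
  let in_dict := (PySem.List.enumerate in_list 0).foldl (fun (d : PySem.Dict String Int) p => d.insert p.2 p.1) PySem.Dict.empty
  (in_dict.items, in_list)

-- ===== PRECONDITION & SPEC =====
-- Pre_ excludes exactly the inputs on which Python A raises IndexError: a before-region
-- access keys[idx] with min(size_before,size_shape) > len(keys), or an after-region access
-- keys[idx+1-m] whose largest index size_shape - m reaches len(keys).
def Pre_complete_position_py (size_shape : Int) (keys : List String) (size_before : Int) (size_after : Int) : Prop :=
  max 0 (min size_before size_shape) ≤ (keys.length : Int) ∧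
  (max (max size_before size_after) 0 < size_shape →
    size_shape - max 0 (min size_after size_shape - max size_before 0) < (keys.length : Int))
instance (size_shape : Int) (keys : List String) (size_before : Int) (size_after : Int) : Decidable (Pre_complete_position_py size_shape keys size_before size_after) := by unfold Pre_complete_position_py; infer_instance

def pvWitness_complete_position_py : Int × List String × Int × Int := (5, ["a", "b", "c", "d", "e"], 2, 3)

def Spec_complete_position_py (size_shape : Int) (keys : List String) (size_before : Int) (size_after : Int) (out : (List (String × Int)) × List String) : Prop := out = complete_position_py_alt size_shape keys size_before size_after
instance (size_shape : Int) (keys : List String) (size_before : Int) (size_after : Int) (out : (List (String × Int)) × List String) : Decidable (Spec_complete_position_py size_shape keys size_before size_after out) := by unfold Spec_complete_position_py; infer_instance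

-- ===== CLAIM (what is proved, stated in full; the proofs are below) =====
def Claim_equal_complete_position_py : Prop := ∀ (size_shape : Int) (keys : List String) (size_before : Int) (size_after : Int), Dom_complete_position_py size_shape keys size_before size_after → Pre_complete_position_py size_shape keys size_before size_after → Spec_complete_position_py size_shape keys size_before size_after (complete_position_py size_shape keys size_before size_after)

-- ===== LEMMAS AND PROOFS =====

-- the key that A's loop appends at index idx (m = the final placeholder count)
def pvKeyAt (keys : List String) (sb sa m : Int) (idx : Int) : String :=
  if idx < sb then PySem.List.pyGetD keys idx ""
  else if sa ≤ idx then PySem.List.pyGetD keys (idx + 1 - m) ""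
  else "##" ++ PySem.Int.toStr (idx - max sb 0)

-- the dict both programs build: insert key ↦ position over the enumerated list
def pvDictOf (l : List String) : PySem.Dict String Int :=
  (PySem.List.enumerate l 0).foldl (fun d p => d.insert p.2 p.1) PySem.Dict.empty

theorem pvDictOf_append (l : List String) (k : String) :
    pvDictOf (l ++ [k]) = (pvDictOf l).insert k (l.length : Int) := by
  unfold pvDictOf
  rw [PySem.List.enumerate_append, List.foldl_append]
  simp [PySem.List.enumerate_cons, PySem.List.enumerate_nil]

theorem pvLoop (ss : Int) (keys : List String) (sb sa : Int) (c : Nat) (hc : (c : Int) ≤ ss) :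
    (PySem.List.pyRange 0 c 1).foldl
      (fun (st : PySem.Dict String Int × List String × Int) idx =>
        if idx < sb then
          let key := PySem.List.pyGetD keys idx ""
          (st.1.insert key idx, st.2.1 ++ [key], st.2.2)
        else if sa ≤ idx then
          let key := PySem.List.pyGetD keys (idx + 1 - st.2.2) ""
          (st.1.insert key idx, st.2.1 ++ [key], st.2.2)
        else
          let key := "##" ++ PySem.Int.toStr st.2.2
          (st.1.insert key idx, st.2.1 ++ [key], st.2.2 + 1))
      (PySem.Dict.empty, [], 0) =
    (pvDictOf ((PySem.List.pyRange 0 c 1).map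
        (pvKeyAt keys sb sa (max 0 (min sa ss - max sb 0)))),
     (PySem.List.pyRange 0 c 1).map
        (pvKeyAt keys sb sa (max 0 (min sa ss - max sb 0))),
     max 0 (min sa (c : Int) - max sb 0)) := by
  induction c with
  | zero =>
      simp [PySem.List.pyRange_one_eq_nil, pvDictOf, PySem.List.enumerate_nil]
  | succ n ih =>
      have h0 : (0 : Int) ≤ (n : Int) := by positivity
      have hrng : PySem.List.pyRange 0 ((n : Int) + 1) 1 =
          PySem.List.pyRange 0 (n : Int) 1 ++ [(n : Int)] :=
        PySem.List.pyRange_one_succ_right h0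
      have hlen : ((PySem.List.pyRange 0 (n : Int) 1).map
          (pvKeyAt keys sb sa (max 0 (min sa ss - max sb 0)))).length = n := by
        simp [PySem.List.length_pyRange_one]
      have hc' : (n : Int) ≤ ss := by push_cast at hc ⊢; omega
      push_cast
      rw [hrng, List.foldl_append, ih hc', List.map_append, List.map_singleton]
      by_cases h1 : (n : Int) < sb
      · have hk : pvKeyAt keys sb sa (max 0 (min sa ss - max sb 0)) (n : Int) =
            PySem.List.pyGetD keys (n : Int) "" := by
          simp [pvKeyAt, h1]
        simp only [List.foldl_cons, List.foldl_nil, if_pos h1]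
        rw [pvDictOf_append, hlen, hk]
        simp only [Prod.mk.injEq, true_and]
        omega
      · by_cases h2 : sa ≤ (n : Int)
        · have hsec : max 0 (min sa (n : Int) - max sb 0) =
              max 0 (min sa ss - max sb 0) := by omega
          have hk : pvKeyAt keys sb sa (max 0 (min sa ss - max sb 0)) (n : Int) =
              PySem.List.pyGetD keys ((n : Int) + 1 - max 0 (min sa ss - max sb 0)) "" := by
            simp [pvKeyAt, h1, h2]
          simp only [List.foldl_cons, List.foldl_nil, if_neg h1, if_pos h2]
          rw [pvDictOf_append, hlen, hk, hsec]
          simp only [Prod.mk.injEq, true_and]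
          omega
        · have hsec : max 0 (min sa (n : Int) - max sb 0) = (n : Int) - max sb 0 := by omega
          have hk : pvKeyAt keys sb sa (max 0 (min sa ss - max sb 0)) (n : Int) =
              "##" ++ PySem.Int.toStr ((n : Int) - max sb 0) := by
            simp [pvKeyAt, h1, h2]
          simp only [List.foldl_cons, List.foldl_nil, if_neg h1, if_neg h2]
          rw [pvDictOf_append, hlen, hk, hsec]
          simp only [Prod.mk.injEq, true_and]
          omega

theorem pvSegments (ss : Int) (keys : List String) (sb sa : Int)
    (hss : 0 ≤ ss) (hpre : max 0 (min sb ss) ≤ (keys.length : Int)) :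
    PySem.List.slice keys (some 0) (some (max 0 (min sb ss))) ++
      (PySem.List.pyRange 0 (max 0 (min sa ss - max sb 0)) 1).map
        (fun i => "##" ++ PySem.Int.toStr i) ++
      (PySem.List.pyRange (max (max sb sa) 0) ss 1).map
        (fun idx => PySem.List.pyGetD keys (idx + 1 - max 0 (min sa ss - max sb 0)) "") =
    (PySem.List.pyRange 0 ss 1).map
      (pvKeyAt keys sb sa (max 0 (min sa ss - max sb 0))) := by
  set p1 : Int := max 0 (min sb ss) with hp1
  set p2 : Int := min (max (max sb sa) 0) ss with hp2
  set m : Int := max 0 (min sa ss - max sb 0) with hm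
  have h01 : (0 : Int) ≤ p1 := by omega
  have h12 : p1 ≤ p2 := by omega
  have h2s : p2 ≤ ss := by omega
  rw [PySem.List.pyRange_one_append 0 p2 ss (by omega) h2s,
      PySem.List.pyRange_one_append 0 p1 p2 h01 h12, List.map_append, List.map_append]
  congr 1
  congr 1
  -- before segment
  · rw [PySem.List.slice_zero_start, PySem.List.slice_to keys h01]
    apply List.ext_getElem
    · simp [PySem.List.length_pyRange_one]
      omega
    · intro i hi1 hi2
      have hip : (i : Int) < p1 := by
        simp [PySem.List.length_pyRange_one] at hi2
        omega
      have hisb : (i : Int) < sb := by omega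
      have hilen : i < keys.length := by omega
      simp only [List.getElem_take, List.getElem_map, PySem.List.getElem_pyRange_one]
      rw [pvKeyAt, if_pos (by omega : (0 : Int) + (i : Int) < sb)]
      rw [show (0 : Int) + (i : Int) = ((i : Nat) : Int) by omega, PySem.List.pyGetD_natCast]
      simp [List.getD_eq_getElem?_getD, hilen]
  -- middle segment
  · rw [PySem.List.pyRange_one 0 m, PySem.List.pyRange_one p1 p2, List.map_map, List.map_map]
    have hmn : (m - 0).toNat = (p2 - p1).toNat := by omega
    rw [hmn]
    apply List.map_congr_left
    intro k hk
    rw [List.mem_range] at hk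
    have hk' : (k : Int) < p2 - p1 := by omega
    have hmid : m = p2 - p1 := by omega
    have hnonempty : p1 < p2 := by omega
    have hb : ¬ (p1 + (k : Int) < sb) := by omega
    have ha : ¬ (sa ≤ p1 + (k : Int)) := by omega
    simp only [Function.comp]
    rw [pvKeyAt, if_neg hb, if_neg ha]
    congr 1
    congr 1
    omega
  -- after segment
  · by_cases hs : max (max sb sa) 0 ≤ ss
    · have hp2s : p2 = max (max sb sa) 0 := by omega
      rw [hp2s]
      apply List.map_congr_left
      intro idx hidx
      rw [PySem.List.mem_pyRange_one] at hidx
      rw [pvKeyAt, if_neg (by omega), if_pos (by omega)]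
    · rw [PySem.List.pyRange_one_eq_nil (by omega : ss ≤ max (max sb sa) 0),
          PySem.List.pyRange_one_eq_nil (by omega : ss ≤ p2)]
      simp

theorem pvA_eq (ss : Int) (keys : List String) (sb sa : Int) (hss : 0 ≤ ss) :
    complete_position_py ss keys sb sa =
      ((pvDictOf ((PySem.List.pyRange 0 ss 1).map
          (pvKeyAt keys sb sa (max 0 (min sa ss - max sb 0))))).items,
       (PySem.List.pyRange 0 ss 1).map
          (pvKeyAt keys sb sa (max 0 (min sa ss - max sb 0)))) := by
  have h := pvLoop ss keys sb sa ss.toNat (by omega)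
  rw [show ((ss.toNat : Nat) : Int) = ss from by omega] at h
  unfold complete_position_py
  rw [h]

theorem complete_position_py_spec : Claim_equal_complete_position_py := by
  intro ss keys sb sa hdom hpre
  unfold Spec_complete_position_py
  obtain ⟨hpre1, _⟩ := hpre
  by_cases hss : 0 ≤ ss
  · rw [pvA_eq ss keys sb sa hss]
    unfold complete_position_py_alt
    dsimp only
    rw [pvSegments ss keys sb sa hss hpre1]
    rfl
  · have h1 : ss ≤ (0 : Int) := by omega
    have h2 : max 0 (min sb ss) = (0 : Int) := by omega
    have h3 : max 0 (min sa ss - max sb 0) = (0 : Int) := by omega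
    have h4 : ss ≤ max (max sb sa) 0 := by omega
    unfold complete_position_py complete_position_py_alt
    dsimp only
    rw [h2, h3, PySem.List.pyRange_one_eq_nil h1, PySem.List.pyRange_one_eq_nil h4,
        PySem.List.slice_zero_start, PySem.List.slice_to keys (by omega : (0:Int) ≤ 0)]
    simp [PySem.List.enumerate_nil]
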